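-- pv_equiv track=rewrite | github.com/joelmccoy/adventofcode | day11/day11.py | part_2
-- ===== SOURCE A (Python) =====
-- from collections import defaultdict
--
-- def part_2(lines, expansion_factor=1000000):
--     # get list of rows to expand
--     rows_to_expand = defaultdict(lambda: True)
--     for x in range(len(lines)):
--         for y in range(len(lines[x])):
--             if lines[x][y] == "#":
--                 rows_to_expand[x] = False
--                 break
--
--     # get list of columns to expand
--     cols_to_expand = defaultdict(lambda: True)
--     for y in range(len(lines[0])):
--         for x in range(len(lines)):
--             if lines[x][y] == "#":
--                 cols_to_expand[y] = False
--                 break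
--
--     # get galaxy coordinates
--     galaxy_coordinates = []
--     row_expansion = 0
--     for x in range(len(lines)):
--         col_expansion = 0
--         for y in range(len(lines[x])):
--             if lines[x][y] == "#":
--                 galaxy_coordinates.append((x + row_expansion, y + col_expansion))
--                 continue
--             if rows_to_expand[x]:
--                 row_expansion += expansion_factor - 1
--                 rows_to_expand[x] = False
--             if cols_to_expand[y]:
--                 col_expansion += expansion_factor - 1
--
--     # for each galaxy, add up the shortest distances
--     sum = 0
--     for x in range(len(galaxy_coordinates)):
--         for y in range(len(galaxy_coordinates)):
--             if x >= y:
--                 continue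
--             distance = abs(galaxy_coordinates[x][0] - galaxy_coordinates[y][0]) + abs(
--                 galaxy_coordinates[x][1] - galaxy_coordinates[y][1]
--             )
--             sum += distance
--     return sum
-- ===== SOURCE B (Python) =====
-- def part_2(lines, expansion_factor=1000000):
--     # Per-axis prefix-sum formula over sorted expanded coordinates, built from
--     # per-row / per-column galaxy counts (no galaxy list, no pairwise loop).
--     e = expansion_factor - 1
--     width = len(lines[0])
--     row_counts = [line[:width].count("#") for line in lines]
--     col_counts = [sum(1 for line in lines if line[y] == "#") for y in range(width)]
--     xs = _axis_coords(row_counts, e)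
--     ys = _axis_coords(col_counts, e)
--     return _axis_sum(xs) + _axis_sum(ys)
--
--
-- def _axis_coords(counts, e):
--     # counts[i] = galaxies at raw coordinate i; a zero-count line expands by e
--     coords = []
--     pos = 0
--     for c in counts:
--         coords.extend([pos] * c)
--         pos += 1 + (e if c == 0 else 0)
--     return coords
--
--
-- def _axis_sum(coords):
--     # sum of pairwise |differences| = sum_i (i*v_i - prefix_i) over the sorted list
--     total = prefix = 0
--     for i, v in enumerate(sorted(coords)):
--         total += v * i - prefix
--         prefix += v
--     return total
-- ===== Notes on version B (the rewrite author's own statement) =====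
-- stated objective: faster
-- what changed: A builds an explicit galaxy list with a stateful cell-by-cell expansion scan and sums Manhattan distances over all O(G^2) pairs; B computes per-row/per-column galaxy counts, turns them into expanded per-axis coordinates in one sweep, and gets each axis's pairwise |difference| sum from the classic sorted prefix-sum formula.
-- outside the precondition, e.g. on part_2(['#', '.#.#'], 2): A returns 10, B returns 0; on part_2(['#', ''], 2): A returns 0, B raises IndexError
import Mathlib
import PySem

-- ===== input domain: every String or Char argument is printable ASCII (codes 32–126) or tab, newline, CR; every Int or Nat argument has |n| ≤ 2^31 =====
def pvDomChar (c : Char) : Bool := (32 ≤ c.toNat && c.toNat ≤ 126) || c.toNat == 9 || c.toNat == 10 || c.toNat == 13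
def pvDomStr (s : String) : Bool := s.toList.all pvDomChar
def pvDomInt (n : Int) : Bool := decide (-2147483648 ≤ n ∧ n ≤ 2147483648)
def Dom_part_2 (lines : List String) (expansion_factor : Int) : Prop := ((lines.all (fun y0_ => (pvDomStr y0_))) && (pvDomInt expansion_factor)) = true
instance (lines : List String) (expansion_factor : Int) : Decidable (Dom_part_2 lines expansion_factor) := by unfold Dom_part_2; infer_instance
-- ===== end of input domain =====

-- B replaces A's O(G^2) pairwise-distance loop over G galaxies by per-axis prefix sums
-- over sorted expanded coordinates (and builds those coordinates from per-row/per-column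
-- galaxy counts instead of A's stateful cell-by-cell scan).

-- ===== PORT A =====
-- 'for y in range(len(lines[x])): if lines[x][y] == "#": d[x] = False; break'
-- (iterates the row's chars in index order; 'break' = stop at the first '#')
def part2RowScan (d : PySem.Dict Int Bool) (x : Int) (cs : List Char) : PySem.Dict Int Bool :=
  match cs with
  | [] => d
  | c :: rest => if c = '#' then d.insert x false else part2RowScan d x rest

-- 'for x in range(len(lines)): if lines[x][y] == "#": d[y] = False; break'
-- (iterates the rows in index order; 'break' = stop at the first row with '#' at column y)
def part2ColScan (d : PySem.Dict Int Bool) (y : Int) (rows : List (List Char)) : PySem.Dict Int Bool :=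
  match rows with
  | [] => d
  | r :: rest => if PySem.List.pyGetD r y ' ' = '#' then d.insert y false else part2ColScan d y rest

-- the body of A's third loop for one row x (state: galaxy list, row_expansion, rows_to_expand);
-- defaultdict reads are ported as getD with the default (the dict is only ever read via lookups)
def part2GalStep (ef : Int) (colsD : PySem.Dict Int Bool)
    (st : List (Int × Int) × Int × PySem.Dict Int Bool) (x : Int) (cs : List Char) :
    List (Int × Int) × Int × PySem.Dict Int Bool :=
  let r :=
    (PySem.List.pyRange 0 (PySem.List.len cs)).foldl
      (fun (st2 : List (Int × Int) × Int × Int × PySem.Dict Int Bool) y =>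
        if PySem.List.pyGetD cs y ' ' = '#' then
          (st2.1 ++ [(x + st2.2.1, y + st2.2.2.1)], st2.2.1, st2.2.2.1, st2.2.2.2)
        else
          let q := if st2.2.2.2.getD x true then (st2.2.1 + (ef - 1), st2.2.2.2.insert x false)
                   else (st2.2.1, st2.2.2.2)
          (st2.1, q.1, st2.2.2.1 + (if colsD.getD y true then ef - 1 else 0), q.2))
      (st.1, st.2.1, 0, st.2.2)
  (r.1, r.2.1, r.2.2.2)

-- A's final double index loop ('if x >= y: continue')
def part2SumLoop (gal : List (Int × Int)) : Int :=
  (PySem.List.pyRange 0 (PySem.List.len gal)).foldl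
    (fun acc x =>
      (PySem.List.pyRange 0 (PySem.List.len gal)).foldl
        (fun acc y =>
          if x ≥ y then acc
          else
            acc + (|(PySem.List.pyGetD gal x (0, 0)).1 - (PySem.List.pyGetD gal y (0, 0)).1| +
                   |(PySem.List.pyGetD gal x (0, 0)).2 - (PySem.List.pyGetD gal y (0, 0)).2|))
        acc)
    0

def part_2 (lines : List String) (expansion_factor : Int) : Int :=
  let n : Int := PySem.List.len lines
  let rowsD : PySem.Dict Int Bool :=
    (PySem.List.pyRange 0 n).foldl
      (fun d x => part2RowScan d x (PySem.List.pyGetD lines x "").toList) PySem.Dict.empty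
  let colsD : PySem.Dict Int Bool :=
    (PySem.List.pyRange 0 (PySem.Str.len (PySem.List.pyGetD lines 0 ""))).foldl
      (fun d y => part2ColScan d y (lines.map String.toList)) PySem.Dict.empty
  let st :=
    (PySem.List.pyRange 0 n).foldl
      (fun st x => part2GalStep expansion_factor colsD st x (PySem.List.pyGetD lines x "").toList)
      ([], 0, rowsD)
  part2SumLoop st.1

-- ===== PORT B =====
-- coords.extend([pos] * c); pos += 1 + (e if c == 0 else 0)
def part2AxisCoords (e : Int) (counts : List Int) : List Int :=
  (counts.foldl
    (fun (st : List Int × Int) c =>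
      (st.1 ++ List.replicate c.toNat st.2, st.2 + 1 + (if c = 0 then e else 0)))
    ([], 0)).1

-- 'for i, v in enumerate(sorted(coords)): total += v*i - prefix; prefix += v'
def part2AxisSum (coords : List Int) : Int :=
  ((PySem.List.enumerate (PySem.List.sorted coords (fun v => v) false)).foldl
    (fun (st : Int × Int) iv => (st.1 + iv.2 * iv.1 - st.2, st.2 + iv.2)) (0, 0)).1

def part_2_alt (lines : List String) (expansion_factor : Int) : Int :=
  let e := expansion_factor - 1
  -- len(lines[0]): lines is nonempty under Pre_, so the pyGetD default is never used
  let width : Int := PySem.Str.len (PySem.List.pyGetD lines 0 "")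
  let rowCounts : List Int :=
    lines.map (fun l => ((PySem.List.slice l.toList none (some width)).count '#' : Int))
  let colCounts : List Int :=
    (PySem.List.pyRange 0 width).map
      (fun y => lines.foldl
        (fun acc l => if PySem.List.pyGetD l.toList y ' ' = '#' then acc + 1 else acc) (0 : Int))
  part2AxisSum (part2AxisCoords e rowCounts) + part2AxisSum (part2AxisCoords e colCounts)

-- ===== PRECONDITION & SPEC =====
-- Pre_ excludes the empty list and ragged inputs (a row shorter than row 0, on which A
-- raises IndexError, or a '#' beyond row 0's width, whose column A's defaultdict
-- accidentally treats as empty); on a rectangular grid neither can happen.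
def Pre_part_2 (lines : List String) (expansion_factor : Int) : Prop :=
  lines ≠ [] ∧ ∀ l ∈ lines,
    (lines.headD "").toList.length ≤ l.toList.length ∧
    '#' ∉ l.toList.drop (lines.headD "").toList.length

instance (lines : List String) (expansion_factor : Int) : Decidable (Pre_part_2 lines expansion_factor) := by
  unfold Pre_part_2; infer_instance

def pvWitness_part_2 : List String × Int := (["#.", ".#"], 2)

def Spec_part_2 (lines : List String) (expansion_factor : Int) (out : Int) : Prop :=
  out = part_2_alt lines expansion_factor
instance (lines : List String) (expansion_factor : Int) (out : Int) : Decidable (Spec_part_2 lines expansion_factor out) := by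
  unfold Spec_part_2; infer_instance

-- ===== CLAIM (what is proved, stated in full; the proofs are below) =====
def Claim_equal_part_2 : Prop := ∀ (lines : List String) (expansion_factor : Int), Dom_part_2 lines expansion_factor → Pre_part_2 lines expansion_factor → Spec_part_2 lines expansion_factor (part_2 lines expansion_factor)

-- ===== LEMMAS AND PROOFS =====

-- spec-side vocabulary
def pvRowEmpty (cs : List Char) : Bool := !cs.any (· == '#')
def pvColFree (g : List (List Char)) (y : Int) : Bool :=
  !g.any (fun cs => PySem.List.pyGetD cs y ' ' == '#')
-- what A's cols_to_expand lookup returns at any key y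
def pvCl (g : List (List Char)) (w : Int) (y : Int) : Bool :=
  if 0 ≤ y ∧ y < w then pvColFree g y else true

-- closed form of A's inner (per-row) galaxy scan
def pvRowRec (e : Int) (cl : Int → Bool) (xc : Int) : List Char → Int → Int → List (Int × Int)
  | [], _, _ => []
  | c :: rest, y, ce =>
    if c = '#' then (xc, y + ce) :: pvRowRec e cl xc rest (y + 1) ce
    else pvRowRec e cl xc rest (y + 1) (ce + if cl y then e else 0)

-- closed form of A's whole galaxy-coordinates loop
def pvGals (e : Int) (cl : Int → Bool) : List (List Char) → Int → Int → List (Int × Int)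
  | [], _, _ => []
  | cs :: rest, s, racc =>
    pvRowRec e cl (s + racc) cs 0 0 ++
    pvGals e cl rest (s + 1) (racc + if !cs.isEmpty && pvRowEmpty cs then e else 0)

-- sum of pairwise absolute differences / Manhattan distances
def pvPairAbs : List Int → Int
  | [] => 0
  | a :: t => (t.map (fun b => |a - b|)).sum + pvPairAbs t

def pvPairAbs2 : List (Int × Int) → Int
  | [] => 0
  | a :: t => (t.map (fun b => |a.1 - b.1| + |a.2 - b.2|)).sum + pvPairAbs2 t

-- expanded column coordinate of column y
def pvYc (g : List (List Char)) (w : Int) (e : Int) (y : Nat) : Int :=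
  (y : Int) + e * ((List.range y).countP (fun j : Nat => pvCl g w (j : Int)))

-- cell-wise inner step of A's galaxy loop with the cols lookup abstracted
def pvGStep (e : Int) (cl : Int → Bool) (x : Int)
    (st2 : List (Int × Int) × Int × Int × PySem.Dict Int Bool) (p : Int × Char) :
    List (Int × Int) × Int × Int × PySem.Dict Int Bool :=
  if p.2 = '#' then (st2.1 ++ [(x + st2.2.1, p.1 + st2.2.2.1)], st2.2.1, st2.2.2.1, st2.2.2.2)
  else
    let q := if st2.2.2.2.getD x true then (st2.2.1 + e, st2.2.2.2.insert x false)
             else (st2.2.1, st2.2.2.2)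
    (st2.1, q.1, st2.2.2.1 + (if cl p.1 then e else 0), q.2)

-- closed form of B's coordinate builder
def pvAC (e : Int) : List Int → Int → List Int
  | [], _ => []
  | c :: t, pos => List.replicate c.toNat pos ++ pvAC e t (pos + 1 + if c = 0 then e else 0)

-- snd components of pvRowRec (independent of the row coordinate)
def pvRowSnd (e : Int) (cl : Int → Bool) : List Char → Int → Int → List Int
  | [], _, _ => []
  | c :: rest, y, ce =>
    if c = '#' then (y + ce) :: pvRowSnd e cl rest (y + 1) ce
    else pvRowSnd e cl rest (y + 1) (ce + if cl y then e else 0)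

-- ---- small generic helpers ----
theorem pvFoldlId {α β : Type} (l : List α) (a : β) : l.foldl (fun acc _ => acc) a = a := by
  induction l generalizing a with
  | nil => rfl
  | cons x t ih => simpa using ih a

theorem pvFlatMapIte {α β : Type} (l : List α) (p : α → Bool) (f : α → β) :
    (l.flatMap (fun c => if p c then [f c] else [])) = (l.filter p).map f := by
  induction l with
  | nil => rfl
  | cons c t ih =>
    by_cases hc : p c <;> simp [List.filter_cons, hc, ih]

theorem pvSumMapAbs (t : List Int) (a : Int) (h : ∀ b ∈ t, a ≤ b) :
    (t.map (fun b => |a - b|)).sum = t.sum - t.length * a := by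
  induction t with
  | nil => simp
  | cons b t ih =>
    have hb : a ≤ b := h b (List.mem_cons_self ..)
    have : |a - b| = b - a := by
      rw [abs_of_nonpos (by omega)]; ring
    simp only [List.map_cons, List.sum_cons, this, ih (fun c hc => h c (List.mem_cons_of_mem _ hc)),
      List.length_cons]
    push_cast
    ring


theorem pvRowEmpty_eq_false {cs : List Char} (h : '#' ∈ cs) : pvRowEmpty cs = false := by
  have hany : cs.any (· == '#') = true := List.any_eq_true.mpr ⟨'#', h, by simp⟩
  simp [pvRowEmpty, hany]

theorem pvRowEmpty_eq_true {cs : List Char} (h : '#' ∉ cs) : pvRowEmpty cs = true := by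
  have hany : cs.any (· == '#') = false := by
    rw [List.any_eq_false]
    intro c hc
    simp only [beq_iff_eq]
    rintro rfl
    exact h hc
  simp [pvRowEmpty, hany]

-- ---- phase 1 and 2: the dicts ----
theorem pvRowScan_eq (d : PySem.Dict Int Bool) (x : Int) (cs : List Char) :
    part2RowScan d x cs = if '#' ∈ cs then d.insert x false else d := by
  induction cs with
  | nil => simp [part2RowScan]
  | cons c rest ih =>
    by_cases hc : c = '#'
    · subst hc; simp [part2RowScan]
    · have hc' : ¬('#' = c) := fun h => hc h.symm
      simp [part2RowScan, hc, hc', ih]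

theorem pvColScan_eq (d : PySem.Dict Int Bool) (y : Int) (rows : List (List Char)) :
    part2ColScan d y rows =
      if rows.any (fun r => PySem.List.pyGetD r y ' ' == '#') then d.insert y false else d := by
  induction rows with
  | nil => simp [part2ColScan]
  | cons r rest ih =>
    by_cases hr : PySem.List.pyGetD r y ' ' = '#'
    · simp [part2ColScan, hr]
    · simp [part2ColScan, hr, ih]

theorem pvFoldIns_getD (ks : List Int) (P : Int → Prop) [DecidablePred P] (d : PySem.Dict Int Bool) (k : Int) :
    ((ks.foldl (fun d x => if P x then d.insert x false else d) d).getD k true)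
      = if k ∈ ks ∧ P k then false else d.getD k true := by
  induction ks generalizing d with
  | nil => simp
  | cons a t ih =>
    simp only [List.foldl_cons]
    rw [ih]
    by_cases h1 : k ∈ t ∧ P k
    · rw [if_pos h1, if_pos ⟨List.mem_cons_of_mem _ h1.1, h1.2⟩]
    · rw [if_neg h1]
      by_cases hP : P a
      · rw [if_pos hP, PySem.Dict.getD_insert]
        by_cases hka : k = a
        · rw [if_pos hka, if_pos ⟨by simp [hka], by rw [hka]; exact hP⟩]
        · rw [if_neg hka, if_neg (by
            rintro ⟨hm, hp⟩
            rcases List.mem_cons.mp hm with h | h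
            · exact hka h
            · exact h1 ⟨h, hp⟩)]
      · rw [if_neg hP, if_neg (by
          rintro ⟨hm, hp⟩
          rcases List.mem_cons.mp hm with h | h
          · exact hP (h ▸ hp)
          · exact h1 ⟨h, hp⟩)]

-- ---- phase 3: the galaxy scan ----
theorem pvRowRec_empty (e : Int) (cl : Int → Bool) (xc : Int) (cs : List Char) (y ce : Int)
    (h : '#' ∉ cs) : pvRowRec e cl xc cs y ce = [] := by
  induction cs generalizing y ce with
  | nil => simp [pvRowRec]
  | cons c rest ih =>
    have hc : c ≠ '#' := by rintro rfl; exact h (List.mem_cons_self ..)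
    have h' : '#' ∉ rest := fun hm => h (List.mem_cons_of_mem _ hm)
    simp only [pvRowRec, if_neg hc]
    exact ih _ _ h'

theorem pvRowSnd_empty (e : Int) (cl : Int → Bool) (cs : List Char) (y ce : Int)
    (h : '#' ∉ cs) : pvRowSnd e cl cs y ce = [] := by
  induction cs generalizing y ce with
  | nil => simp [pvRowSnd]
  | cons c rest ih =>
    have hc : c ≠ '#' := by rintro rfl; exact h (List.mem_cons_self ..)
    have h' : '#' ∉ rest := fun hm => h (List.mem_cons_of_mem _ hm)
    simp only [pvRowSnd, if_neg hc]
    exact ih _ _ h'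

theorem pvGStep_run_rdFalse (e : Int) (cl : Int → Bool) (x : Int) (cs : List Char) :
    ∀ (s : Int) (gal : List (Int × Int)) (re ce : Int) (rd : PySem.Dict Int Bool),
      rd.getD x true = false →
      ∃ ce', (PySem.List.enumerate cs s).foldl (pvGStep e cl x) (gal, re, ce, rd)
        = (gal ++ pvRowRec e cl (x + re) cs s ce, re, ce', rd) := by
  induction cs with
  | nil => intro s gal re ce rd _; exact ⟨ce, by simp [pvRowRec]⟩
  | cons c rest ih =>
    intro s gal re ce rd hrd
    rw [PySem.List.enumerate_cons, List.foldl_cons]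
    by_cases hc : c = '#'
    · obtain ⟨ce', h⟩ := ih (s + 1) (gal ++ [(x + re, s + ce)]) re ce rd hrd
      refine ⟨ce', ?_⟩
      have hstep : pvGStep e cl x (gal, re, ce, rd) (s, c)
          = (gal ++ [(x + re, s + ce)], re, ce, rd) := by simp [pvGStep, hc]
      rw [hstep, h]
      simp [pvRowRec, hc, List.append_assoc]
    · obtain ⟨ce', h⟩ := ih (s + 1) gal re (ce + if cl s then e else 0) rd hrd
      refine ⟨ce', ?_⟩
      have hstep : pvGStep e cl x (gal, re, ce, rd) (s, c)
          = (gal, re, ce + (if cl s then e else 0), rd) := by simp [pvGStep, hc, hrd]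
      rw [hstep, h]
      simp [pvRowRec, hc]

theorem pvGStep_run_emptyRow (e : Int) (cl : Int → Bool) (x : Int) (c : Char) (rest : List Char)
    (s : Int) (gal : List (Int × Int)) (re ce : Int) (rd : PySem.Dict Int Bool)
    (hrd : rd.getD x true = true) (hemp : '#' ∉ (c :: rest)) :
    ∃ ce', (PySem.List.enumerate (c :: rest) s).foldl (pvGStep e cl x) (gal, re, ce, rd)
      = (gal, re + e, ce', rd.insert x false) := by
  have hc : c ≠ '#' := by rintro rfl; exact hemp (List.mem_cons_self ..)
  have h' : '#' ∉ rest := fun hm => hemp (List.mem_cons_of_mem _ hm)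
  rw [PySem.List.enumerate_cons, List.foldl_cons]
  have hfalse : (rd.insert x false).getD x true = false := by
    rw [PySem.Dict.getD_insert]; simp
  obtain ⟨ce', h⟩ := pvGStep_run_rdFalse e cl x rest (s + 1) gal (re + e)
      ((ce + if cl s then e else 0)) (rd.insert x false) hfalse
  refine ⟨ce', ?_⟩
  have hstep : pvGStep e cl x (gal, re, ce, rd) (s, c)
      = (gal, re + e, ce + (if cl s then e else 0), rd.insert x false) := by
    simp [pvGStep, hc, hrd]
  rw [hstep]
  rw [pvRowRec_empty e cl (x + (re + e)) rest _ _ h'] at h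
  simpa using h

theorem pvGalStep_eq (ef : Int) (colsD : PySem.Dict Int Bool) (cl : Int → Bool)
    (hcl : ∀ y, colsD.getD y true = cl y)
    (st : List (Int × Int) × Int × PySem.Dict Int Bool) (x : Int) (cs : List Char) :
    part2GalStep ef colsD st x cs =
      (let r := (PySem.List.enumerate cs).foldl (pvGStep (ef - 1) cl x) (st.1, st.2.1, 0, st.2.2)
       (r.1, r.2.1, r.2.2.2)) := by
  simp only [part2GalStep, PySem.List.enumerate_eq_map_pyRange cs ' ', List.foldl_map,
    pvGStep, hcl]

theorem pvOuter_run (e : Int) (cl : Int → Bool) (rows : List (List Char)) :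
    ∀ (s : Int) (gal : List (Int × Int)) (racc : Int) (rd : PySem.Dict Int Bool),
      (∀ (k : Nat) (hk : k < rows.length), rd.getD (s + (k : Int)) true = pvRowEmpty rows[k]) →
      ((PySem.List.enumerate rows s).foldl
        (fun st p =>
          (let r := (PySem.List.enumerate p.2).foldl (pvGStep e cl p.1) (st.1, st.2.1, 0, st.2.2)
           (r.1, r.2.1, r.2.2.2)))
        (gal, racc, rd)).1
        = gal ++ pvGals e cl rows s racc := by
  induction rows with
  | nil => intro s gal racc rd _; simp [pvGals]
  | cons cs rest ih =>
    intro s gal racc rd hrd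
    rw [PySem.List.enumerate_cons, List.foldl_cons]
    have hrd0 : rd.getD s true = pvRowEmpty cs := by
      have := hrd 0 (by simp)
      simpa using this
    have hshift : ∀ (rd' : PySem.Dict Int Bool),
        (∀ j, j ≠ s → rd'.getD j true = rd.getD j true) →
        (∀ (k : Nat) (hk : k < rest.length), rd'.getD ((s + 1) + (k : Int)) true = pvRowEmpty rest[k]) := by
      intro rd' hagree k hk
      have hne : (s + 1) + (k : Int) ≠ s := by omega
      rw [hagree _ hne]
      have := hrd (k + 1) (by simpa using hk)
      have harith : s + ((k : Nat) + 1 : Nat) = (s + 1) + (k : Int) := by push_cast; ring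
      rw [harith] at this
      simpa using this
    by_cases hhash : '#' ∈ cs
    · have hre : pvRowEmpty cs = false := by
        have hany : cs.any (· == '#') = true := List.any_eq_true.mpr ⟨'#', hhash, by simp⟩
        simp [pvRowEmpty, hany]
      have hrdF : rd.getD s true = false := by rw [hrd0, hre]
      obtain ⟨ce', hinner⟩ := pvGStep_run_rdFalse e cl s cs 0 gal racc 0 rd hrdF
      simp only [hinner]
      rw [ih (s + 1) (gal ++ pvRowRec e cl (s + racc) cs 0 0) racc rd
        (hshift rd (fun _ _ => rfl))]
      have hie : (!cs.isEmpty && pvRowEmpty cs) = false := by simp [hre]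
      simp [pvGals, hie, List.append_assoc]
    · have hre : pvRowEmpty cs = true := by
        simp only [pvRowEmpty]
        simp only [Bool.not_eq_eq_eq_not, Bool.not_true, List.any_eq_false]
        intro c hc
        simp only [beq_iff_eq]
        rintro rfl
        exact hhash hc
      match cs, hhash, hre with
      | [], _, _ =>
        simp only [PySem.List.enumerate_nil, List.foldl_nil]
        rw [ih (s + 1) gal racc rd (hshift rd (fun _ _ => rfl))]
        simp [pvGals, pvRowRec]
      | c :: rest', hhash, hre =>
        have hrdT : rd.getD s true = true := by rw [hrd0, hre]
        obtain ⟨ce', hinner⟩ := pvGStep_run_emptyRow e cl s c rest' 0 gal racc 0 rd hrdT hhash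
        simp only [hinner]
        rw [ih (s + 1) gal (racc + e) (rd.insert s false)
          (hshift _ (fun j hj => by rw [PySem.Dict.getD_insert, if_neg hj]))]
        have hie : (!(c :: rest').isEmpty && pvRowEmpty (c :: rest')) = true := by
          simp [hre]
        simp only [pvGals, hie, if_pos rfl]
        rw [pvRowRec_empty e cl (s + racc) (c :: rest') 0 0 hhash]
        simp

-- ---- A's sum loop ----
theorem pvInnerLoop (gal : List (Int × Int)) (acc : Int) (k : Nat) (hk : k < gal.length) :
    (PySem.List.pyRange 0 (gal.length : Int)).foldl
      (fun acc y => if (k : Int) ≥ y then acc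
        else acc + (|(PySem.List.pyGetD gal (k : Int) (0, 0)).1 - (PySem.List.pyGetD gal y (0, 0)).1| +
                    |(PySem.List.pyGetD gal (k : Int) (0, 0)).2 - (PySem.List.pyGetD gal y (0, 0)).2|)) acc
    = acc + ((gal.drop (k + 1)).map
        (fun b => |(gal.getD k (0, 0)).1 - b.1| + |(gal.getD k (0, 0)).2 - b.2|)).sum := by
  have hsplit := PySem.List.pyRange_one_append 0 ((k : Int) + 1) (gal.length : Int)
    (by omega) (by omega)
  rw [hsplit, List.foldl_append]
  rw [PySem.List.foldl_congr_mem (PySem.List.pyRange 0 ((k : Int) + 1)) _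
    (fun acc _ => acc) acc
    (by
      intro a y hy
      have := PySem.List.mem_pyRange_one.mp hy
      rw [if_pos (by omega)])]
  rw [pvFoldlId]
  rw [PySem.List.foldl_congr_mem (PySem.List.pyRange ((k : Int) + 1) (gal.length : Int)) _
    (fun acc y =>
      acc + (|(PySem.List.pyGetD gal (k : Int) (0, 0)).1 - (PySem.List.pyGetD gal y (0, 0)).1| +
             |(PySem.List.pyGetD gal (k : Int) (0, 0)).2 - (PySem.List.pyGetD gal y (0, 0)).2|)) acc
    (by
      intro a y hy
      have := PySem.List.mem_pyRange_one.mp hy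
      rw [if_neg (by omega)])]
  rw [PySem.List.foldl_pyRange_pyGetD' gal (0, 0)
    (fun acc b => acc + (|(PySem.List.pyGetD gal (k : Int) (0, 0)).1 - b.1| +
                         |(PySem.List.pyGetD gal (k : Int) (0, 0)).2 - b.2|)) acc (by omega)]
  rw [PySem.List.foldl_add]
  have h1 : ((k : Int) + 1).toNat = k + 1 := by omega
  have h2 : PySem.List.pyGetD gal (k : Int) (0, 0) = gal.getD k (0, 0) :=
    PySem.List.pyGetD_natCast gal k (0, 0)
  rw [h1, h2]

theorem pvPairSum (gal : List (Int × Int)) :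
    ((List.range gal.length).map
      (fun k => ((gal.drop (k + 1)).map
        (fun b => |(gal.getD k (0, 0)).1 - b.1| + |(gal.getD k (0, 0)).2 - b.2|)).sum)).sum
    = pvPairAbs2 gal := by
  induction gal with
  | nil => simp [pvPairAbs2]
  | cons a t ih =>
    rw [List.length_cons, List.range_succ_eq_map, List.map_cons, List.map_map, List.sum_cons]
    have hterm : ∀ j : Nat,
        (((a :: t).drop (Nat.succ j + 1)).map
          (fun b => |((a :: t).getD (Nat.succ j) (0, 0)).1 - b.1| +
                    |((a :: t).getD (Nat.succ j) (0, 0)).2 - b.2|)).sum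
        = ((t.drop (j + 1)).map
          (fun b => |(t.getD j (0, 0)).1 - b.1| + |(t.getD j (0, 0)).2 - b.2|)).sum := by
      intro j
      rw [show Nat.succ j + 1 = (j + 1) + 1 from rfl, List.drop_succ_cons, List.getD_cons_succ]
    simp only [Function.comp_def, hterm, ih]
    simp [pvPairAbs2]

theorem pvSumLoop_eq (gal : List (Int × Int)) : part2SumLoop gal = pvPairAbs2 gal := by
  unfold part2SumLoop
  simp only [PySem.List.len_eq]
  rw [PySem.List.pyRange_zero_natCast gal.length, List.foldl_map]
  rw [PySem.List.foldl_congr_mem (List.range gal.length) _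
    (fun acc k =>
      acc + ((gal.drop (k + 1)).map
        (fun b => |(gal.getD k (0, 0)).1 - b.1| + |(gal.getD k (0, 0)).2 - b.2|)).sum) 0
    (by
      intro a k hk
      rw [← PySem.List.pyRange_zero_natCast gal.length]
      exact pvInnerLoop gal a k (List.mem_range.mp hk))]
  rw [PySem.List.foldl_add]
  rw [pvPairSum]
  simp

theorem pvPairAbs2_split (g : List (Int × Int)) :
    pvPairAbs2 g = pvPairAbs (g.map Prod.fst) + pvPairAbs (g.map Prod.snd) := by
  induction g with
  | nil => simp [pvPairAbs2, pvPairAbs]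
  | cons a t ih =>
    simp only [pvPairAbs2, pvPairAbs, List.map_cons, List.map_map, Function.comp_def, ih]
    rw [PySem.List.sum_map_add_int t (fun b => |a.1 - b.1|) (fun b => |a.2 - b.2|)]
    ring

theorem pvPairAbs_perm {l l' : List Int} (h : l.Perm l') : pvPairAbs l = pvPairAbs l' := by
  induction h with
  | nil => rfl
  | cons a h ih =>
    simp only [pvPairAbs, ih]
    rw [List.Perm.sum_eq (h.map (fun b => |a - b|))]
  | swap a b l =>
    simp only [pvPairAbs, List.map_cons, List.sum_cons]
    rw [abs_sub_comm b a]
    ring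
  | trans _ _ ih1 ih2 => exact ih1.trans ih2

theorem pvSweep (m : List Int) (hm : m.Pairwise (· ≤ ·)) :
    ∀ (k p t0 : Int),
      (PySem.List.enumerate m k).foldl
        (fun (st : Int × Int) iv => (st.1 + iv.2 * iv.1 - st.2, st.2 + iv.2)) (t0, p)
        = (t0 + pvPairAbs m + k * m.sum - m.length * p, p + m.sum) := by
  induction m with
  | nil => intro k p t0; simp [pvPairAbs]
  | cons a t ih =>
    intro k p t0
    rw [List.pairwise_cons] at hm
    rw [PySem.List.enumerate_cons, List.foldl_cons]
    rw [ih hm.2 (k + 1) (p + a) (t0 + a * k - p)]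
    have habs : (t.map (fun b => |a - b|)).sum = t.sum - t.length * a :=
      pvSumMapAbs t a hm.1
    simp only [pvPairAbs, habs, List.sum_cons, List.length_cons, Prod.mk.injEq]
    refine ⟨?_, ?_⟩
    · push_cast; ring
    · ring

theorem pvAxisSum_eq (l : List Int) : part2AxisSum l = pvPairAbs l := by
  unfold part2AxisSum
  have hp : (PySem.List.sorted l (fun v => v)).Pairwise (· ≤ ·) := by
    simpa using PySem.List.sorted_pairwise l (fun v => v)
  rw [pvSweep _ hp 0 0 0]
  simp only [mul_zero, zero_mul, sub_zero, add_zero, zero_add, mul_comm]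
  have := pvPairAbs_perm (PySem.List.sorted_perm l (fun v => v) false)
  simpa using this

-- ---- B's coordinate lists ----
theorem pvAxisCoords_eq (e : Int) (counts : List Int) :
    part2AxisCoords e counts = pvAC e counts 0 := by
  have key : ∀ (cs : List Int) (acc : List Int) (pos : Int),
      (cs.foldl (fun (st : List Int × Int) c =>
          (st.1 ++ List.replicate c.toNat st.2, st.2 + 1 + (if c = 0 then e else 0)))
        (acc, pos)).1 = acc ++ pvAC e cs pos := by
    intro cs
    induction cs with
    | nil => intro acc pos; simp [pvAC]
    | cons c t ih =>
      intro acc pos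
      simp only [List.foldl_cons]
      rw [ih]
      simp [pvAC]
  simpa [part2AxisCoords] using key counts [] 0

theorem pvRowRec_map_fst (e : Int) (cl : Int → Bool) (xc : Int) (cs : List Char) (y ce : Int) :
    (pvRowRec e cl xc cs y ce).map Prod.fst = List.replicate (cs.count '#') xc := by
  induction cs generalizing y ce with
  | nil => simp [pvRowRec]
  | cons c rest ih =>
    by_cases hc : c = '#'
    · subst hc
      simp [pvRowRec, ih, List.count_cons, List.replicate_succ]
    · have hc' : ¬(('#' : Char) = c) := fun h => hc h.symm
      simp [pvRowRec, hc, List.count_cons, hc', ih]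

theorem pvRowRec_map_snd (e : Int) (cl : Int → Bool) (xc : Int) (cs : List Char) (y ce : Int) :
    (pvRowRec e cl xc cs y ce).map Prod.snd = pvRowSnd e cl cs y ce := by
  induction cs generalizing y ce with
  | nil => simp [pvRowRec, pvRowSnd]
  | cons c rest ih =>
    by_cases hc : c = '#' <;> simp [pvRowRec, pvRowSnd, hc, ih]

theorem pvGals_map_snd (e : Int) (cl : Int → Bool) (rows : List (List Char)) :
    ∀ (s racc : Int),
      (pvGals e cl rows s racc).map Prod.snd
        = rows.flatMap (fun cs => pvRowSnd e cl cs 0 0) := by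
  induction rows with
  | nil => intro s racc; simp [pvGals]
  | cons cs rest ih =>
    intro s racc
    simp [pvGals, List.map_append, pvRowRec_map_snd, ih]

-- B's xs equals the fst-projection of the closed-form galaxy list
theorem pvXs_eq (e : Int) (cl : Int → Bool) (w : Nat) (hw : 0 < w) (rows : List (List Char))
    (hrows : ∀ cs ∈ rows, w ≤ cs.length ∧ '#' ∉ cs.drop w) :
    ∀ (s racc : Int),
      pvAC e (rows.map (fun cs => ((cs.take w).count '#' : Int))) (s + racc)
        = (pvGals e cl rows s racc).map Prod.fst := by
  induction rows with
  | nil => intro s racc; simp [pvAC, pvGals]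
  | cons cs rest ih =>
    intro s racc
    obtain ⟨hlen, hdrop⟩ := hrows cs (List.mem_cons_self ..)
    have hrest : ∀ c ∈ rest, w ≤ c.length ∧ '#' ∉ c.drop w :=
      fun c hc => hrows c (List.mem_cons_of_mem _ hc)
    have hcount : cs.count '#' = (cs.take w).count '#' := by
      conv_lhs => rw [← List.take_append_drop w cs]
      rw [List.count_append, List.count_eq_zero.mpr hdrop]
      omega
    have hne : cs.isEmpty = false := by
      cases cs with
      | nil => simp at hlen; omega
      | cons _ _ => rfl
    have hcond : (((cs.take w).count '#' : Int) = 0) ↔ (pvRowEmpty cs = true) := by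
      rw [← hcount]
      constructor
      · intro h
        have h0 : cs.count '#' = 0 := by exact_mod_cast h
        have : '#' ∉ cs := List.count_eq_zero.mp h0
        simp only [pvRowEmpty, Bool.not_eq_eq_eq_not, Bool.not_true, List.any_eq_false]
        intro c hc
        simp only [beq_iff_eq]
        rintro rfl
        exact this hc
      · intro h
        have : '#' ∉ cs := by
          intro hm
          simp only [pvRowEmpty, Bool.not_eq_eq_eq_not, Bool.not_true, List.any_eq_false] at h
          have hx := h '#' hm
          simp at hx
        simp [List.count_eq_zero.mpr this]
    simp only [List.map_cons, pvAC, pvGals, List.map_append, pvRowRec_map_fst, hcount,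
      Int.toNat_natCast]
    congr 1
    by_cases hE : pvRowEmpty cs
    · rw [if_pos (hcond.mpr hE)]
      have harr : (s + racc) + 1 + e = (s + 1) + (racc + e) := by ring
      rw [harr, ih hrest]
      simp [hne, hE]
    · rw [if_neg (fun h => hE (hcond.mp h))]
      have harr : (s + racc) + 1 + 0 = (s + 1) + (racc + 0) := by ring
      rw [harr, ih hrest]
      simp [hne, hE]

-- per-row closed form of the snd components
theorem pvRowSnd_closed (g : List (List Char)) (wI e : Int) (w : Nat) (hwI : wI = (w : Int))
    (cs : List Char) (hcs : cs ∈ g) (hlen : w ≤ cs.length) (hdrop : '#' ∉ cs.drop w) :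
    pvRowSnd e (pvCl g wI) cs 0 0
      = ((List.range w).filter (fun j : Nat => PySem.List.pyGetD cs (j : Int) ' ' == '#')).map
          (pvYc g wI e) := by
  have aux : ∀ (n y : Nat), y + n = w →
      pvRowSnd e (pvCl g wI) (cs.drop y) (y : Int)
          (e * ((List.range y).countP (fun j : Nat => pvCl g wI (j : Int))))
        = ((List.range' y n).filter (fun j : Nat => PySem.List.pyGetD cs (j : Int) ' ' == '#')).map
            (pvYc g wI e) := by
    intro n
    induction n with
    | zero =>
      intro y hy
      have : y = w := by omega
      subst this
      rw [pvRowSnd_empty _ _ _ _ _ hdrop]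
      simp
    | succ n ihn =>
      intro y hy
      have hyw : y < w := by omega
      have hylen : y < cs.length := by omega
      have hstep : cs.drop y = cs[y] :: cs.drop (y + 1) := List.drop_eq_getElem_cons hylen
      have hget : PySem.List.pyGetD cs (y : Int) ' ' = cs[y] := by
        rw [PySem.List.pyGetD_natCast]
        exact List.getD_eq_getElem cs ' ' hylen
      have hcount : (List.range (y + 1)).countP (fun j : Nat => pvCl g wI (j : Int))
          = (List.range y).countP (fun j : Nat => pvCl g wI (j : Int))
            + (if pvCl g wI (y : Int) then 1 else 0) := by
        rw [List.range_succ, List.countP_append]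
        simp [List.countP_cons]
      have hrange : List.range' y (n + 1) = y :: List.range' (y + 1) n := List.range'_succ
      have hcast : ((y + 1 : Nat) : Int) = (y : Int) + 1 := by push_cast; ring
      rw [hstep, hrange]
      by_cases hch : cs[y] = '#'
      · have hclF : pvCl g wI (y : Int) = false := by
          have hfree : pvColFree g (y : Int) = false := by
            have hany : g.any (fun cs => PySem.List.pyGetD cs (y : Int) ' ' == '#') = true :=
              List.any_eq_true.mpr ⟨cs, hcs, by rw [hget, hch]; simp⟩
            simp only [pvColFree, hany, Bool.not_true]
          simp [pvCl, hfree, hwI, hyw]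
        have hstep2 : pvRowSnd e (pvCl g wI) (cs[y] :: cs.drop (y + 1)) (y : Int)
              (e * ((List.range y).countP (fun j : Nat => pvCl g wI (j : Int)) : Int))
            = ((y : Int) + e * ((List.range y).countP (fun j : Nat => pvCl g wI (j : Int)) : Int))
              :: pvRowSnd e (pvCl g wI) (cs.drop (y + 1)) ((y : Int) + 1)
                (e * ((List.range y).countP (fun j : Nat => pvCl g wI (j : Int)) : Int)) := by
          simp [pvRowSnd, hch]
        rw [hstep2]
        rw [List.filter_cons_of_pos (by rw [hget, hch]; decide), List.map_cons]
        have ihh := ihn (y + 1) (by omega)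
        rw [hcount, hclF] at ihh
        simp only [Bool.false_eq_true, if_false, Nat.add_zero] at ihh
        rw [hcast] at ihh
        rw [ihh]
        simp only [pvYc]
      · have hce : e * ((List.range y).countP (fun j : Nat => pvCl g wI (j : Int)) : Int)
              + (if pvCl g wI (y : Int) then e else 0)
            = e * ((List.range (y + 1)).countP (fun j : Nat => pvCl g wI (j : Int)) : Int) := by
          rw [hcount]
          by_cases hcl : pvCl g wI (y : Int) = true <;> simp [hcl] <;> push_cast <;> ring
        have hstep2 : pvRowSnd e (pvCl g wI) (cs[y] :: cs.drop (y + 1)) (y : Int)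
              (e * ((List.range y).countP (fun j : Nat => pvCl g wI (j : Int)) : Int))
            = pvRowSnd e (pvCl g wI) (cs.drop (y + 1)) ((y : Int) + 1)
                (e * ((List.range (y + 1)).countP (fun j : Nat => pvCl g wI (j : Int)) : Int)) := by
          simp only [pvRowSnd, if_neg hch]
          rw [hce]
        rw [hstep2]
        rw [List.filter_cons_of_neg (by rw [hget]; simpa using hch)]
        have ihh := ihn (y + 1) (by omega)
        rw [hcast] at ihh
        exact ihh
  have h0 := aux w 0 (by omega)
  simp only [List.drop_zero, List.range_zero, List.countP_nil, Nat.cast_zero, mul_zero] at h0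
  rw [List.range_eq_range']
  exact h0

-- column-major form of B's ys
theorem pvYs_eq (g : List (List Char)) (wI e : Int) (w : Nat) (hwI : wI = (w : Int)) :
    pvAC e ((List.range w).map
        (fun j : Nat => (g.countP (fun cs => PySem.List.pyGetD cs (j : Int) ' ' == '#') : Int))) 0
      = (List.range w).flatMap
          (fun j : Nat => List.replicate (g.countP (fun cs => PySem.List.pyGetD cs (j : Int) ' ' == '#'))
            (pvYc g wI e j)) := by
  have aux : ∀ (n y : Nat), y + n = w →
      pvAC e ((List.range' y n).map
        (fun j : Nat => (g.countP (fun cs => PySem.List.pyGetD cs (j : Int) ' ' == '#') : Int)))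
        (pvYc g wI e y)
      = (List.range' y n).flatMap
          (fun j : Nat => List.replicate (g.countP (fun cs => PySem.List.pyGetD cs (j : Int) ' ' == '#'))
            (pvYc g wI e j)) := by
    intro n
    induction n with
    | zero => intro y hy; simp [pvAC]
    | succ n ihn =>
      intro y hy
      have hyw : y < w := by omega
      rw [List.range'_succ]
      simp only [List.map_cons, pvAC, List.flatMap_cons, Int.toNat_natCast]
      congr 1
      have hcnt0 : ((g.countP (fun cs => PySem.List.pyGetD cs (y : Int) ' ' == '#') : Int) = 0)
          ↔ pvColFree g (y : Int) = true := by
        constructor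
        · intro h
          have h0 : g.countP (fun cs => PySem.List.pyGetD cs (y : Int) ' ' == '#') = 0 := by
            exact_mod_cast h
          simp only [pvColFree, Bool.not_eq_eq_eq_not, Bool.not_true, List.any_eq_false]
          intro cs hcs
          have := List.countP_eq_zero.mp h0 cs hcs
          simpa using this
        · intro h
          simp only [pvColFree, Bool.not_eq_eq_eq_not, Bool.not_true, List.any_eq_false] at h
          have : g.countP (fun cs => PySem.List.pyGetD cs (y : Int) ' ' == '#') = 0 :=
            List.countP_eq_zero.mpr (fun cs hcs => by simpa using h cs hcs)
          exact_mod_cast this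
      have hstep : pvYc g wI e y + 1 +
            (if (g.countP (fun cs => PySem.List.pyGetD cs (y : Int) ' ' == '#') : Int) = 0
             then e else 0)
          = pvYc g wI e (y + 1) := by
        unfold pvYc
        rw [List.range_succ, List.countP_append]
        have hsing : (List.countP (fun j : Nat => pvCl g wI (j : Int)) [y])
            = if pvCl g wI (y : Int) then 1 else 0 := by simp [List.countP_cons]
        rw [hsing]
        have hcl : pvCl g wI (y : Int) = pvColFree g (y : Int) := by
          simp [pvCl, hwI, hyw]
        by_cases hf : pvColFree g (y : Int) = true
        · rw [if_pos (hcnt0.mpr hf)]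
          rw [hcl, if_pos hf]
          push_cast; ring
        · rw [if_neg (fun h => hf (hcnt0.mp h))]
          rw [hcl, if_neg hf]
          push_cast
          ring
      rw [hstep, ihn (y + 1) (by omega)]
  have h0 := aux w 0 (by omega)
  have hy0 : pvYc g wI e 0 = 0 := by simp [pvYc]
  rw [hy0] at h0
  rw [List.range_eq_range']
  exact h0

theorem pvFlatMap_append_perm {α β : Type} (l : List α) (g h : α → List β) :
    (l.flatMap (fun c => g c ++ h c)).Perm (l.flatMap g ++ l.flatMap h) := by
  induction l with
  | nil => simp
  | cons c t ih =>
    simp only [List.flatMap_cons]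
    rw [List.append_assoc]
    refine ((ih.append_left (h c)).append_left (g c)).trans ?_
    rw [← List.append_assoc (h c)]
    refine (((List.perm_append_comm (l₁ := h c) (l₂ := t.flatMap g)).append_right _).append_left _).trans ?_
    rw [List.append_assoc, List.append_assoc]

theorem pvInterchange {ρ γ : Type} (rows : List ρ) (cols : List γ) (p : ρ → γ → Bool)
    (f : γ → Int) :
    (rows.flatMap (fun r => (cols.filter (p r)).map f)).Perm
      (cols.flatMap (fun c => List.replicate (rows.countP (fun r => p r c)) (f c))) := by
  induction rows with
  | nil => simp
  | cons r rest ih =>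
    simp only [List.flatMap_cons]
    have hsplit : ∀ c, List.replicate ((r :: rest).countP (fun r => p r c)) (f c)
        = (if p r c then [f c] else []) ++ List.replicate (rest.countP (fun r => p r c)) (f c) := by
      intro c
      rw [List.countP_cons]
      by_cases hc : p r c
      · rw [if_pos hc, List.replicate_succ, if_pos hc]
        rfl
      · simp [hc]
    have hrw : (cols.flatMap (fun c => List.replicate ((r :: rest).countP (fun r => p r c)) (f c)))
        = cols.flatMap (fun c => (if p r c then [f c] else []) ++
            List.replicate (rest.countP (fun r => p r c)) (f c)) := by
      simp only [List.flatMap_def]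
      exact congrArg _ (List.map_congr_left (fun c _ => hsplit c))
    rw [hrw, ← pvFlatMapIte cols (p r) f]
    exact (ih.append_left _).trans (pvFlatMap_append_perm cols _ _).symm

-- degenerate cases
theorem pvGalsEmptyAll (e : Int) (cl : Int → Bool) (rows : List (List Char))
    (h : ∀ cs ∈ rows, '#' ∉ cs) :
    ∀ (s racc : Int), pvGals e cl rows s racc = [] := by
  induction rows with
  | nil => intro s racc; simp [pvGals]
  | cons cs rest ih =>
    intro s racc
    simp only [pvGals]
    rw [pvRowRec_empty _ _ _ _ _ _ (h cs (List.mem_cons_self ..)),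
      ih (fun c hc => h c (List.mem_cons_of_mem _ hc))]
    simp

theorem pvACzeros (e : Int) (counts : List Int) (h : ∀ c ∈ counts, c.toNat = 0) :
    ∀ pos, pvAC e counts pos = [] := by
  induction counts with
  | nil => intro pos; simp [pvAC]
  | cons c t ih =>
    intro pos
    simp only [pvAC]
    rw [h c (List.mem_cons_self ..), ih (fun x hx => h x (List.mem_cons_of_mem _ hx))]
    simp

-- ===== VERDICT (by name: the statement is the Claim_ definition above) =====
theorem part_2_spec : Claim_equal_part_2 := by
  unfold Claim_equal_part_2
  intro lines f _hdom hpre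
  unfold Spec_part_2
  obtain ⟨hne, hrows⟩ := hpre
  simp only [part_2, part_2_alt]
  set g : List (List Char) := lines.map String.toList with hg
  set w : Nat := (lines.headD "").toList.length with hwdef
  have hhead : PySem.List.pyGetD lines 0 "" = lines.headD "" := by
    cases lines with
    | nil => exact absurd rfl hne
    | cons a t => rw [PySem.List.pyGetD_ofNat']; rfl
  have hwidth : PySem.Str.len (PySem.List.pyGetD lines 0 "") = (w : Int) := by
    rw [hhead, PySem.Str.len_eq, hwdef]
  have hgrows : ∀ cs ∈ g, w ≤ cs.length ∧ '#' ∉ cs.drop w := by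
    intro cs hcs
    rw [hg] at hcs
    obtain ⟨l, hl, rfl⟩ := List.mem_map.mp hcs
    exact hrows l hl
  have hglen : lines.length = g.length := by rw [hg]; simp
  have hmap2 : ∀ x : Int, (PySem.List.pyGetD lines x "").toList = PySem.List.pyGetD g x [] := by
    intro x
    have h := PySem.List.pyGetD_map String.toList lines x ""
    rw [hg]
    simpa using h.symm
  have hlen2 : PySem.List.len lines = PySem.List.len g := by
    rw [PySem.List.len_eq, PySem.List.len_eq, hglen]
  rw [hwidth]
  simp only [hmap2]
  rw [hlen2]
  -- rows_to_expand characterization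
  have hrd0 : ∀ (k : Nat) (hk : k < g.length),
      ((PySem.List.pyRange 0 (PySem.List.len g)).foldl
        (fun d x => part2RowScan d x (PySem.List.pyGetD g x [])) PySem.Dict.empty).getD
        ((0 : Int) + (k : Int)) true = pvRowEmpty g[k] := by
    intro k hk
    simp only [pvRowScan_eq]
    rw [pvFoldIns_getD]
    have hx : (0 : Int) + (k : Int) = ((k : Nat) : Int) := by ring
    rw [hx]
    have hget : PySem.List.pyGetD g ((k : Nat) : Int) [] = g[k] := by
      rw [PySem.List.pyGetD_natCast]
      exact List.getD_eq_getElem g [] hk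
    by_cases hmemH : '#' ∈ g[k]
    · rw [if_pos ⟨by
        rw [PySem.List.len_eq]
        exact PySem.List.mem_pyRange_one.mpr ⟨by positivity, by exact_mod_cast hk⟩,
        by rw [hget]; exact hmemH⟩]
      exact (pvRowEmpty_eq_false hmemH).symm
    · rw [if_neg (by rintro ⟨_, hp⟩; rw [hget] at hp; exact hmemH hp)]
      rw [pvRowEmpty_eq_true hmemH]
      simp
  -- cols_to_expand characterization
  have hcl : ∀ y : Int,
      ((PySem.List.pyRange 0 ((w : Nat) : Int)).foldl
        (fun d y => part2ColScan d y g) PySem.Dict.empty).getD y true = pvCl g (w : Int) y := by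
    intro y
    simp only [pvColScan_eq]
    rw [pvFoldIns_getD]
    by_cases h1 : 0 ≤ y ∧ y < (w : Int)
    · by_cases h2 : g.any (fun r => PySem.List.pyGetD r y ' ' == '#') = true
      · rw [if_pos ⟨PySem.List.mem_pyRange_one.mpr ⟨h1.1, h1.2⟩, h2⟩]
        simp [pvCl, h1, pvColFree, h2]
      · rw [if_neg (by rintro ⟨_, hq⟩; exact h2 hq)]
        have h2' : g.any (fun r => PySem.List.pyGetD r y ' ' == '#') = false := by
          simpa using h2
        simp [pvCl, h1, pvColFree, h2']
    · rw [if_neg (by rintro ⟨hm, _⟩; exact h1 (PySem.List.mem_pyRange_one.mp hm))]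
      simp [pvCl, h1]
  -- galaxy list
  simp only [pvGalStep_eq f _ (pvCl g (w : Nat)) hcl]
  rw [← List.foldl_map (f := fun j : Int => (j, PySem.List.pyGetD g j []))
      (g := fun (st : List (Int × Int) × Int × PySem.Dict Int Bool) (p : Int × List Char) =>
        (let r := (PySem.List.enumerate p.2).foldl (pvGStep (f - 1) (pvCl g (w : Nat)) p.1)
          (st.1, st.2.1, 0, st.2.2)
         (r.1, r.2.1, r.2.2.2)))]
  rw [← PySem.List.enumerate_eq_map_pyRange g []]
  rw [pvOuter_run (f - 1) (pvCl g (w : Nat)) g 0 [] 0 _ hrd0]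
  rw [List.nil_append, pvSumLoop_eq, pvPairAbs2_split]
  -- B's count lists
  have hrc : lines.map (fun l => ((PySem.List.slice l.toList none (some ((w : Nat) : Int))).count '#' : Int))
      = g.map (fun cs => (((cs.take w).count '#' : Nat) : Int)) := by
    rw [hg, List.map_map]
    apply List.map_congr_left
    intro l _
    simp only [Function.comp_apply]
    rw [PySem.List.slice_to _ (by positivity)]
    simp
  have hccols : (PySem.List.pyRange 0 ((w : Nat) : Int)).map
      (fun y => lines.foldl
        (fun acc l => if PySem.List.pyGetD l.toList y ' ' = '#' then acc + 1 else acc) (0 : Int))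
      = (List.range w).map
        (fun j : Nat => ((g.countP (fun cs => PySem.List.pyGetD cs (j : Int) ' ' == '#') : Nat) : Int)) := by
    rw [PySem.List.pyRange_zero_natCast, List.map_map]
    apply List.map_congr_left
    intro j _
    simp only [Function.comp_apply]
    have hb : (fun (acc : Int) (l : String) =>
          if PySem.List.pyGetD l.toList (j : Int) ' ' = '#' then acc + 1 else acc)
        = (fun (acc : Int) (l : String) =>
          if (PySem.List.pyGetD l.toList (j : Int) ' ' == '#') = true then acc + 1 else acc) := by
      funext acc l
      by_cases h : PySem.List.pyGetD l.toList (j : Int) ' ' = '#' <;> simp [h]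
    rw [hb, PySem.List.foldl_count_if, hg, List.countP_map]
    simp [Function.comp_def]
  rw [hrc, hccols, pvAxisCoords_eq, pvAxisCoords_eq, pvAxisSum_eq, pvAxisSum_eq]
  by_cases hw : w = 0
  · -- degenerate zero-width grid: no galaxies on either side
    have hnoh : ∀ cs ∈ g, '#' ∉ cs := by
      intro cs hcs
      have := (hgrows cs hcs).2
      rw [hw] at this
      simpa using this
    rw [pvGalsEmptyAll _ _ _ hnoh 0 0]
    have hz : ∀ c ∈ g.map (fun cs => (((cs.take w).count '#' : Nat) : Int)), c.toNat = 0 := by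
      intro c hc
      obtain ⟨cs, hcs, rfl⟩ := List.mem_map.mp hc
      rw [hw]
      simp
    rw [pvACzeros _ _ hz 0, hw]
    simp [pvAC, pvPairAbs]
  · -- positive width
    have hxs := pvXs_eq (f - 1) (pvCl g (w : Nat)) w (Nat.pos_of_ne_zero hw) g hgrows 0 0
    simp only [add_zero] at hxs
    rw [hxs, pvYs_eq g ((w : Nat) : Int) (f - 1) w rfl]
    congr 1
    rw [pvGals_map_snd]
    have hsnd : ∀ cs ∈ g, pvRowSnd (f - 1) (pvCl g (w : Nat)) cs 0 0
        = ((List.range w).filter (fun j : Nat => PySem.List.pyGetD cs (j : Int) ' ' == '#')).map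
          (pvYc g ((w : Nat) : Int) (f - 1)) := by
      intro cs hcs
      exact pvRowSnd_closed g ((w : Nat) : Int) (f - 1) w rfl cs hcs (hgrows cs hcs).1 (hgrows cs hcs).2
    rw [List.flatMap_def, List.map_congr_left hsnd, ← List.flatMap_def]
    exact pvPairAbs_perm (pvInterchange g (List.range w)
      (fun cs j => PySem.List.pyGetD cs (j : Int) ' ' == '#') (pvYc g ((w : Nat) : Int) (f - 1)))
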